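-- pv_equiv track=rewrite | github.com/tbafna/PythonScripts | Analysis_Expt_201901/Functions.py | minValnInd
-- ===== SOURCE A (Python) =====
-- def minValnInd(costOptions, flagSame):
--     operator = list()
--     unique_entries = set(costOptions)
--     valInd = { value : [ i for i, v in enumerate(costOptions) if v == value ] for value in unique_entries }
--     keyVal = list(valInd.keys())
--     min_value = min(keyVal)
--
--     if 0 in valInd[min_value]:
--         operator.append('D')
--     if 1 in valInd[min_value]:
--         operator.append('I')
--     if 2 in valInd[min_value]:
--         if flagSame == 0:
--             operator.append('S')
--         else:
--             operator.append('N')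
--     flagSame = None
--     return min_value, ''.join(operator)
-- ===== SOURCE B (Python) =====
-- # Single pass: compute the minimum with one running-min loop, then test only
-- # positions 0,1,2 directly against it (A builds a full value->indices dict).
-- def minValnInd(costOptions, flagSame):
--     m = costOptions[0]
--     for v in costOptions:
--         if v < m:
--             m = v
--     operator = ''
--     if costOptions[0] == m:
--         operator += 'D'
--     if len(costOptions) > 1 and costOptions[1] == m:
--         operator += 'I'
--     if len(costOptions) > 2 and costOptions[2] == m:
--         operator += 'S' if flagSame == 0 else 'N'
--     return m, operator
-- ===== Notes on version B (the rewrite author's own statement) =====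
-- stated objective: faster
-- what changed: Replaces the set/dict-of-index-lists construction (which scans the whole list once per distinct value) by a single running-min pass followed by direct equality tests at positions 0, 1 and 2.
import Mathlib
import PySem

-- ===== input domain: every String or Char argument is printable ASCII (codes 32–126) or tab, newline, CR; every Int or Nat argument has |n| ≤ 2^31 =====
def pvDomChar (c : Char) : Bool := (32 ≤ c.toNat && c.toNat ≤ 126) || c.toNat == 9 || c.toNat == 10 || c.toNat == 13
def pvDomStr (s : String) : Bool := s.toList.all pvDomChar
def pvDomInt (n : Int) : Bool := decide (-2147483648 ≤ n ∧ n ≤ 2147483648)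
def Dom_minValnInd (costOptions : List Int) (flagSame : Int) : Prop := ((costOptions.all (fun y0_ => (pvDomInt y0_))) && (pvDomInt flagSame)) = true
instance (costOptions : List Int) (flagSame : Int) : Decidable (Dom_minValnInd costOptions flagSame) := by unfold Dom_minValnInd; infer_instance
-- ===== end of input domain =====

-- B replaces A's set/dict-of-index-lists construction by one running-min pass
-- plus direct equality tests at positions 0, 1 and 2.


-- ===== PORT A =====
-- ''.join of the single-character appends is built as a List Char and wrapped with String.ofList.
def minValnInd (costOptions : List Int) (flagSame : Int) : Int × String :=
  let uniqueEntries : PySem.Set Int := PySem.Set.ofList costOptions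
  let valInd : PySem.Dict Int (List Int) :=
    uniqueEntries.foldl (fun d value =>
      PySem.Dict.insert d value
        ((PySem.List.enumerate costOptions 0).filterMap
          (fun p => if p.2 = value then some p.1 else none))) PySem.Dict.empty
  let keyVal : List Int := PySem.Dict.keys valInd
  match PySem.List.min? keyVal (fun x => x) with
  | none => (0, "")  -- Python: min([]) raises ValueError; excluded by Pre_
  | some min_value =>
    let inds : List Int := PySem.Dict.getD valInd min_value []
    let operator : List Char :=
      (if (0 : Int) ∈ inds then ['D'] else []) ++
      (if (1 : Int) ∈ inds then ['I'] else []) ++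
      (if (2 : Int) ∈ inds then (if flagSame = 0 then ['S'] else ['N']) else [])
    (min_value, String.ofList operator)

-- ===== PORT B =====
def minValnInd_alt (costOptions : List Int) (flagSame : Int) : Int × String :=
  match costOptions with
  | [] => (0, "")  -- Python: costOptions[0] raises IndexError; excluded by Pre_
  | h :: _ =>
    let m : Int := costOptions.foldl (fun acc v => if v < acc then v else acc) h
    let operator : List Char :=
      (if h = m then ['D'] else []) ++
      (if 1 < costOptions.length ∧ costOptions.getD 1 0 = m then ['I'] else []) ++
      (if 2 < costOptions.length ∧ costOptions.getD 2 0 = m then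
        (if flagSame = 0 then ['S'] else ['N']) else [])
    (m, String.ofList operator)

-- ===== PRECONDITION & SPEC =====
-- Pre_ excludes only the empty list, on which A raises ValueError (min of an empty sequence).
def Pre_minValnInd (costOptions : List Int) (flagSame : Int) : Prop := costOptions ≠ []
instance (costOptions : List Int) (flagSame : Int) : Decidable (Pre_minValnInd costOptions flagSame) := by unfold Pre_minValnInd; infer_instance
def pvWitness_minValnInd : List Int × Int := ([3, 1, 1, 2], 0)

def Spec_minValnInd (costOptions : List Int) (flagSame : Int) (out : Int × String) : Prop := out = minValnInd_alt costOptions flagSame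
instance (costOptions : List Int) (flagSame : Int) (out : Int × String) : Decidable (Spec_minValnInd costOptions flagSame out) := by unfold Spec_minValnInd; infer_instance

-- ===== CLAIM (what is proved, stated in full; the proofs are below) =====
def Claim_equal_minValnInd : Prop := ∀ (costOptions : List Int) (flagSame : Int), Dom_minValnInd costOptions flagSame → Pre_minValnInd costOptions flagSame → Spec_minValnInd costOptions flagSame (minValnInd costOptions flagSame)

-- ===== LEMMAS AND PROOFS =====

-- B's running min never exceeds its starting value.
theorem foldlMin_init_le (xs : List Int) (a : Int) :
    xs.foldl (fun acc v => if v < acc then v else acc) a ≤ a := by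
  induction xs generalizing a with
  | nil => simp
  | cons x t ih => exact le_trans (ih _) (by dsimp; split <;> omega)

-- B's running min is a lower bound of the list.
theorem foldlMin_le (xs : List Int) (a : Int) :
    ∀ y ∈ xs, xs.foldl (fun acc v => if v < acc then v else acc) a ≤ y := by
  induction xs generalizing a with
  | nil => intro y hy; cases hy
  | cons x t ih =>
    intro y hy
    rcases List.mem_cons.mp hy with hy | hy
    · subst hy
      exact le_trans (foldlMin_init_le t _) (by dsimp; split <;> omega)
    · exact ih _ y hy

-- B's running min is the start value or an element of the list.
theorem foldlMin_mem (xs : List Int) (a : Int) :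
    xs.foldl (fun acc v => if v < acc then v else acc) a = a ∨
    xs.foldl (fun acc v => if v < acc then v else acc) a ∈ xs := by
  induction xs generalizing a with
  | nil => left; rfl
  | cons x t ih =>
    simp only [List.foldl_cons]
    by_cases h : x < a
    · simp only [if_pos h]
      rcases ih x with h2 | h2
      · right; rw [h2]; exact List.mem_cons_self
      · right; exact List.mem_cons_of_mem _ h2
    · simp only [if_neg h]
      rcases ih a with h2 | h2
      · left; exact h2
      · right; exact List.mem_cons_of_mem _ h2

theorem mem_idxList (L : List Int) (M : Int) (i : Int) :
    i ∈ (PySem.List.enumerate L 0).filterMap (fun p => if p.2 = M then some p.1 else none) ↔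
      ∃ (k : Nat), ∃ _ : k < L.length, (k : Int) = i ∧ L[k] = M := by
  simp only [List.mem_filterMap, PySem.List.mem_enumerate_iff]
  constructor
  · rintro ⟨p, ⟨k, hk, rfl⟩, hp⟩
    by_cases hM : L[k] = M
    · simp only [hM] at hp
      exact ⟨k, hk, by simpa using hp, hM⟩
    · simp only at hp
      rw [if_neg hM] at hp
      exact absurd hp (by simp)
  · rintro ⟨k, hk, rfl, hLk⟩
    exact ⟨(0 + k, L[k]), ⟨k, hk, rfl⟩, by simp [hLk]⟩

theorem minValnInd_eq_alt (h0 : Int) (t : List Int) (flag : Int) :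
    minValnInd (h0 :: t) flag = minValnInd_alt (h0 :: t) flag := by
  simp only [minValnInd, minValnInd_alt]
  set D : PySem.Dict Int (List Int) :=
    List.foldl (fun d value => d.insert value
      (List.filterMap (fun p => if p.2 = value then some p.1 else none)
        (PySem.List.enumerate (h0 :: t) 0)))
      PySem.Dict.empty (PySem.Set.ofList (h0 :: t)) with hDdef
  have hkeys2 : D.keys = PySem.Set.ofList (PySem.Set.ofList (h0 :: t)) := by
    rw [hDdef, PySem.Dict.keys_foldl_insert, PySem.Dict.keys_empty, PySem.Set.ofList_eq_foldl]
    rfl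
  have hmemkeys : ∀ k : Int, k ∈ D.keys ↔ k ∈ (h0 :: t) := by
    intro k; rw [hkeys2, PySem.Set.mem_ofList, PySem.Set.mem_ofList]
  have hnodup : D.keys.Nodup := by
    rw [hDdef]
    exact PySem.Dict.nodup_keys_foldl_insert _ _ _ (by rw [PySem.Dict.keys_empty]; exact List.nodup_nil)
  have hitems : D.items = (PySem.Set.ofList (h0 :: t)).map
      (fun v => (v, List.filterMap (fun p => if p.2 = v then some p.1 else none)
        (PySem.List.enumerate (h0 :: t) 0))) := by
    rw [hDdef]
    rw [PySem.Dict.items_foldl_insert_fresh _ (fun v => v)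
      (fun v => List.filterMap (fun p => if p.2 = v then some p.1 else none)
        (PySem.List.enumerate (h0 :: t) 0)) _
      (by intro a _; exact PySem.Dict.contains_empty _)
      (by simpa using PySem.Set.nodup_ofList (h0 :: t))]
    simp [PySem.Dict.empty]
  cases hmin : PySem.List.min? D.keys (fun x => x) with
  | none =>
    exfalso
    have := (PySem.List.min?_eq_none_iff D.keys (fun x => x)).1 hmin
    have h0k : h0 ∈ D.keys := (hmemkeys h0).2 List.mem_cons_self
    rw [this] at h0k; cases h0k
  | some M =>
    have hML : M ∈ (h0 :: t) := (hmemkeys M).1 (PySem.List.min?_mem hmin)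
    have hMle : ∀ y ∈ (h0 :: t), M ≤ y := fun y hy => PySem.List.min?_isMin hmin y ((hmemkeys y).2 hy)
    have hmBmem : (h0 :: t).foldl (fun acc v => if v < acc then v else acc) h0 ∈ (h0 :: t) := by
      rcases foldlMin_mem (h0 :: t) h0 with h | h
      · rw [h]; exact List.mem_cons_self
      · exact h
    have hMeq : M = (h0 :: t).foldl (fun acc v => if v < acc then v else acc) h0 :=
      le_antisymm (hMle _ hmBmem) (foldlMin_le (h0 :: t) h0 M hML)
    have hgetD : D.getD M [] = List.filterMap (fun p => if p.2 = M then some p.1 else none)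
        (PySem.List.enumerate (h0 :: t) 0) := by
      refine PySem.Dict.getD_of_mem_items D ?_ hnodup []
      rw [hitems]
      exact List.mem_map.2 ⟨M, (PySem.Set.mem_ofList _ _).2 hML, rfl⟩
    have h0iff : ((0 : Int) ∈ D.getD M []) ↔ (h0 = M) := by
      rw [hgetD, mem_idxList]
      constructor
      · rintro ⟨k, hk, hki, hLk⟩
        have hk0 : k = 0 := by exact_mod_cast hki
        subst hk0; simpa using hLk
      · intro h
        exact ⟨0, by simp, by simp, by simpa using h⟩
    have h1iff : ((1 : Int) ∈ D.getD M []) ↔ (1 < (h0 :: t).length ∧ (h0 :: t).getD 1 0 = M) := by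
      rw [hgetD, mem_idxList]
      constructor
      · rintro ⟨k, hk, hki, hLk⟩
        have hk1 : k = 1 := by exact_mod_cast hki
        subst hk1
        exact ⟨hk, by rw [List.getD_eq_getElem _ _ hk]; exact hLk⟩
      · rintro ⟨hlen, hval⟩
        exact ⟨1, hlen, by simp, by rw [← List.getD_eq_getElem _ _ hlen]; exact hval⟩
    have h2iff : ((2 : Int) ∈ D.getD M []) ↔ (2 < (h0 :: t).length ∧ (h0 :: t).getD 2 0 = M) := by
      rw [hgetD, mem_idxList]
      constructor
      · rintro ⟨k, hk, hki, hLk⟩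
        have hk2 : k = 2 := by exact_mod_cast hki
        subst hk2
        exact ⟨hk, by rw [List.getD_eq_getElem _ _ hk]; exact hLk⟩
      · rintro ⟨hlen, hval⟩
        exact ⟨2, hlen, by simp, by rw [← List.getD_eq_getElem _ _ hlen]; exact hval⟩
    rw [← hMeq]
    simp only [h0iff, h1iff, h2iff]

-- ===== VERDICT (by name: the statement is the Claim_ definition above) =====
theorem minValnInd_spec : Claim_equal_minValnInd := by
  intro costOptions flagSame _ hpre
  unfold Spec_minValnInd
  match costOptions with
  | [] => exact absurd rfl hpre
  | h :: t => exact minValnInd_eq_alt h t flagSame
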